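-- pv_equiv track=rewrite | github.com/vuanhtuan17072005/-HIT-PYTHON-2024 | buổi 4/Bài 4.py | check
-- ===== SOURCE A (Python) =====
-- def check(set_A,m):
--     set_new =set()
--     sorted_set_A=sorted(set_A)
--     sum=0
--     for num in sorted_set_A:
--         if sum+num <= m :
--            set_new.add(num)
--            sum+=num
--         else:
--             break
--     return set_new
-- ===== SOURCE B (Python) =====
-- def check(set_A, m):
--     # Selection-based greedy: no sorting. Repeatedly extract the minimum of the
--     # remaining elements while it still fits the remaining budget.
--     remaining = list(set_A)
--     chosen = set()
--     budget = m
--     while remaining: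
--         v = min(remaining)
--         if v > budget:
--             break
--         remaining.remove(v)
--         chosen.add(v)
--         budget -= v
--     return chosen
-- ===== Notes on version B (the rewrite author's own statement) =====
-- stated objective: alternative
-- what changed: B never sorts: it repeatedly extracts the minimum of the remaining elements (selection-style) while it fits a decreasing budget, instead of A's sort followed by a running-sum prefix scan with break.
import Mathlib
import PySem

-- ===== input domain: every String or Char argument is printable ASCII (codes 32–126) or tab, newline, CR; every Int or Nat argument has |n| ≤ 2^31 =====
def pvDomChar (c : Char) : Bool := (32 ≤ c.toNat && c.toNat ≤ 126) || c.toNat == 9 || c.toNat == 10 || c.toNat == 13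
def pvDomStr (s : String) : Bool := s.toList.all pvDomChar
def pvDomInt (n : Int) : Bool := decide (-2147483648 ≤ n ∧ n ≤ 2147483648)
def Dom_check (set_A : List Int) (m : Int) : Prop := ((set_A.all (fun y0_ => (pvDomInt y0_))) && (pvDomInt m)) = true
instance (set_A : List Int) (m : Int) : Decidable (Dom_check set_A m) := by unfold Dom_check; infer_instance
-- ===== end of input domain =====

-- B replaces A's sort-then-prefix-scan by repeated minimum extraction under a decreasing budget (no sort); same task, different algorithm.

-- ===== PORT A =====
-- the 'for num in sorted_set_A' loop with its break, carrying (set_new, sum)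
def checkLoopA (m : Int) : List Int → PySem.Set Int → Int → PySem.Set Int
  | [], s, _ => s
  | num :: rest, s, sum =>
      if sum + num ≤ m then checkLoopA m rest (PySem.Set.add s num) (sum + num) else s

def check (set_A : List Int) (m : Int) : List Int :=
  checkLoopA m (PySem.List.sorted set_A (fun x => x) false) PySem.Set.empty 0

-- ===== PORT B =====
-- termination facts the loop below cites: a successful remove shortens the list
theorem erase_length_lt {xs : List Int} {v : Int} (hv : v ∈ xs) :
    (xs.erase v).length < xs.length := by
  have h1 : (xs.erase v).length = xs.length - 1 := List.length_erase_of_mem hv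
  have h2 : 0 < xs.length := List.length_pos_of_mem hv
  omega

theorem remove?_length_lt {xs r : List Int} {v : Int} (h : PySem.List.remove? xs v = some r) :
    r.length < xs.length := by
  have hv : v ∈ xs := by
    by_contra hv
    rw [(PySem.List.remove?_eq_none_iff xs v).mpr hv] at h
    cases h
  rw [PySem.List.remove?_eq_some_erase xs v hv] at h
  cases h
  exact erase_length_lt hv

-- the 'while remaining' loop: v = min(remaining); break if v > budget; remove, add, budget -= v
def selLoopB (remaining : List Int) (chosen : PySem.Set Int) (budget : Int) : PySem.Set Int :=
  match PySem.List.min? remaining (fun x => x) with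
  | none => chosen        -- remaining is empty: loop ends
  | some v =>
      if v > budget then chosen
      else
        match hr : PySem.List.remove? remaining v with
        | none => chosen  -- unreachable: the minimum is a member
        | some rest => selLoopB rest (PySem.Set.add chosen v) (budget - v)
termination_by remaining.length
decreasing_by exact remove?_length_lt hr

def check_alt (set_A : List Int) (m : Int) : List Int :=
  selLoopB set_A PySem.Set.empty m

-- ===== PRECONDITION & SPEC =====
def Spec_check (set_A : List Int) (m : Int) (out : List Int) : Prop := out = check_alt set_A m
instance (set_A : List Int) (m : Int) (out : List Int) : Decidable (Spec_check set_A m out) := by unfold Spec_check; infer_instance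

-- ===== CLAIM (what is proved, stated in full; the proofs are below) =====
def Claim_equal_check : Prop := ∀ (set_A : List Int) (m : Int), Dom_check set_A m → Spec_check set_A m (check set_A m)

-- ===== LEMMAS AND PROOFS =====

-- unfolding lemmas for the three exits/steps of B's while-loop
theorem selLoopB_none {xs : List Int} {c : PySem.Set Int} {b : Int}
    (h : PySem.List.min? xs (fun x => x) = none) : selLoopB xs c b = c := by
  rw [selLoopB, h]

theorem selLoopB_break {xs : List Int} {c : PySem.Set Int} {b v : Int}
    (hm : PySem.List.min? xs (fun x => x) = some v) (hb : v > b) : selLoopB xs c b = c := by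
  rw [selLoopB, hm]
  simp [hb]

theorem selLoopB_step {xs r : List Int} {c : PySem.Set Int} {b v : Int}
    (hm : PySem.List.min? xs (fun x => x) = some v) (hb : ¬ v > b)
    (hr : PySem.List.remove? xs v = some r) :
    selLoopB xs c b = selLoopB r (PySem.Set.add c v) (b - v) := by
  rw [selLoopB, hm]
  simp only [if_neg hb]
  split
  · next heq => rw [hr] at heq; cases heq
  · next rest heq =>
      rw [hr] at heq
      cases heq
      rfl

-- head of the sorted list IS the value Python's min returns
theorem min?_eq_head_sorted {xs : List Int} {v : Int} {t : List Int}
    (h : PySem.List.sorted xs (fun x => x) false = v :: t) :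
    PySem.List.min? xs (fun x => x) = some v := by
  have hperm := PySem.List.sorted_perm xs (fun x => x) false
  have hvmem : v ∈ xs := hperm.mem_iff.mp (by rw [h]; exact List.mem_cons_self)
  rcases hmw : PySem.List.min? xs (fun x => x) with _ | w
  · have hnil : xs = [] := (PySem.List.min?_eq_none_iff xs (fun x => x)).mp hmw
    subst hnil
    cases hvmem
  · have hwmem : w ∈ xs := PySem.List.min?_mem hmw
    have h1 : w ≤ v := PySem.List.min?_isMin hmw v hvmem
    have h2 : v ≤ w := PySem.List.key_head_sorted_le xs (fun x => x) h w hwmem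
    exact congrArg some (le_antisymm h1 h2)

-- erasing that minimum from xs leaves exactly the tail of the sorted list
theorem sorted_erase_head {xs : List Int} {v : Int} {t : List Int}
    (h : PySem.List.sorted xs (fun x => x) false = v :: t) :
    PySem.List.sorted (xs.erase v) (fun x => x) false = t := by
  have hperm := PySem.List.sorted_perm xs (fun x => x) false
  rw [h] at hperm
  have hpw := PySem.List.sorted_pairwise xs (fun x => x)
  rw [h] at hpw
  have htpw : t.Pairwise (· ≤ ·) := (List.pairwise_cons.mp hpw).2
  have hpt : t.Perm (xs.erase v) := by
    have h1 : ((v :: t).erase v).Perm (xs.erase v) := hperm.erase v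
    simpa using h1
  exact PySem.List.sorted_id_eq_of_perm_of_pairwise (xs.erase v) t hpt htpw

-- B's selection loop on any list equals A's scan of its sorted form (budget = m - sum)
theorem selLoopB_eq (m : Int) : ∀ (n : Nat) (xs : List Int), xs.length = n →
    ∀ (chosen : PySem.Set Int) (sum : Int),
    selLoopB xs chosen (m - sum) = checkLoopA m (PySem.List.sorted xs (fun x => x) false) chosen sum := by
  intro n
  induction n using Nat.strong_induction_on with
  | _ n ih =>
    intro xs hn chosen sum
    rcases hs : PySem.List.sorted xs (fun x => x) false with _ | ⟨v, t⟩
    · have hnil : xs = [] := (PySem.List.sorted_eq_nil_iff xs (fun x => x) false).mp hs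
      subst hnil
      rw [selLoopB_none ((PySem.List.min?_eq_none_iff [] (fun x => x)).mpr rfl)]
      rfl
    · have hmin := min?_eq_head_sorted hs
      have hvmem : v ∈ xs := PySem.List.min?_mem hmin
      by_cases hb : v > m - sum
      · have hcond : ¬ (sum + v ≤ m) := by omega
        rw [selLoopB_break hmin hb]
        simp [checkLoopA, hcond]
      · have hcond : sum + v ≤ m := by omega
        have hrem : PySem.List.remove? xs v = some (xs.erase v) :=
          PySem.List.remove?_eq_some_erase xs v hvmem
        rw [selLoopB_step hmin hb hrem]
        simp only [checkLoopA, if_pos hcond]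
        have hlen : (xs.erase v).length < n := hn ▸ erase_length_lt hvmem
        have hih := ih _ hlen (xs.erase v) rfl (PySem.Set.add chosen v) (sum + v)
        rw [sorted_erase_head hs] at hih
        have harith : m - sum - v = m - (sum + v) := by ring
        rw [harith, hih]

-- ===== VERDICT (by name: the statement is the Claim_ definition above) =====
theorem check_spec : Claim_equal_check := by
  intro set_A m _
  show check set_A m = check_alt set_A m
  unfold check check_alt
  have h := selLoopB_eq m set_A.length set_A rfl PySem.Set.empty 0
  rw [show m - 0 = m by ring] at h
  exact h.symm
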